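-- pv_equiv track=rewrite | github.com/Alansdjn/us_text_processing | Lab1/compare.py | get_max_min_words_counts
-- ===== SOURCE A (Python) =====
-- def get_max_min_words_counts(A, B):
--     min_count = 0
--     max_count = 0
--
--     A_keys_set = set(A.keys())
--     B_keys_set = set(B.keys())
--     union_words = A_keys_set | B_keys_set
--
--     # print_message('A_keys_set size: ', len(A_keys_set))
--     # print_message('B_keys_set size: ', len(B_keys_set))
--     # print_message('union_words size: ', len(union_words))
--     #print_message('union_words: ', union_words)
--
--     for word in union_words:
--         w_A = 0
--         w_B = 0
--         if word in A_keys_set: w_A = A[word]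
--         if word in B_keys_set: w_B = B[word]
--         #print_message(word + '_A: ', w_A)
--         #print_message(word + '_B: ', w_B)
--
--         min_count += min(w_A, w_B)
--         max_count += max(w_A, w_B)
--
--     # print_message('min_count: ', min_count, 'max_count: ', max_count)
--     return min_count, max_count
-- ===== SOURCE B (Python) =====
-- def get_max_min_words_counts(A, B):
--     # Sorted-merge strategy: align the two word lists by sorted order into
--     # per-word (count_in_A, count_in_B) pairs (0 when the word is absent),
--     # then sum the componentwise minima and maxima.
--     ka, kb = sorted(A), sorted(B)
--     i = j = 0
--     pairs = []
--     while i < len(ka) and j < len(kb):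
--         x, y = ka[i], kb[j]
--         if x < y:
--             pairs.append((A[x], 0)); i += 1
--         elif y < x:
--             pairs.append((0, B[y])); j += 1
--         else:
--             pairs.append((A[x], B[y])); i += 1; j += 1
--     pairs += [(A[x], 0) for x in ka[i:]]
--     pairs += [(0, B[y]) for y in kb[j:]]
--     return (sum(min(a, b) for a, b in pairs),
--             sum(max(a, b) for a, b in pairs))
-- ===== Notes on version B (the rewrite author's own statement) =====
-- stated objective: alternative
-- what changed: B replaces the hash-set union with a sort-then-two-pointer merge: it sorts both key lists, merges them into aligned (count_A, count_B) pairs, and sums componentwise minima and maxima; no key sets or union set are built.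
import Mathlib
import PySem

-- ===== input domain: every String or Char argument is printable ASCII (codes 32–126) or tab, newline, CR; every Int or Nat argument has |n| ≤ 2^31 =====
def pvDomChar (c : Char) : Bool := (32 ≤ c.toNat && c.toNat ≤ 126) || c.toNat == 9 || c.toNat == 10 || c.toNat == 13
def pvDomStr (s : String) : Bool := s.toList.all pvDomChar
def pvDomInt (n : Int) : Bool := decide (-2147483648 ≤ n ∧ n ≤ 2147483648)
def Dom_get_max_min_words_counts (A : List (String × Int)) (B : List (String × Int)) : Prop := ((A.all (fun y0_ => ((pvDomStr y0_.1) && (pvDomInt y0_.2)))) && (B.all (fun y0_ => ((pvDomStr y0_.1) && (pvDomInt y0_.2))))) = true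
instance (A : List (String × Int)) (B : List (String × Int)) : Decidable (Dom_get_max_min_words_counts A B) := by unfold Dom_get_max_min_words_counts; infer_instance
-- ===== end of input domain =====

-- B replaces A's hash-set union with a sort-then-two-pointer merge into aligned count pairs
-- (objective: alternative algorithm; not claimed faster).


-- dict lookup (first match; under Pre_ the keys are distinct so this is exact)
def pvLookupD (L : List (String × Int)) (k : String) : Int :=
  ((L.find? (fun p => p.1 == k)).map Prod.snd).getD 0

-- ===== PORT A =====
def get_max_min_words_counts (A : List (String × Int)) (B : List (String × Int)) : Int × Int :=
  let aKeys : PySem.Set String := PySem.Set.ofList (A.map Prod.fst)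
  let bKeys : PySem.Set String := PySem.Set.ofList (B.map Prod.fst)
  let unionWords : PySem.Set String := PySem.Set.union aKeys bKeys
  -- for word in union_words: the summed result does not depend on set iteration order
  List.foldl
    (fun (st : Int × Int) word =>
      let wA : Int := if PySem.Set.contains aKeys word then pvLookupD A word else 0
      let wB : Int := if PySem.Set.contains bKeys word then pvLookupD B word else 0
      (st.1 + min wA wB, st.2 + max wA wB))
    (0, 0) unionWords

-- ===== PORT B =====
-- the while loop advances indices i, j through the two sorted key lists; ported as
-- recursion on the corresponding suffixes, the trailing loops are the base cases
def pvMergePairs (A B : List (String × Int)) : List String → List String → List (Int × Int)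
  | [], kb => kb.map (fun y => (0, pvLookupD B y))
  | x :: ka, [] => (x :: ka).map (fun x => (pvLookupD A x, 0))
  | x :: ka, y :: kb =>
      if x < y then (pvLookupD A x, 0) :: pvMergePairs A B ka (y :: kb)
      else if y < x then (0, pvLookupD B y) :: pvMergePairs A B (x :: ka) kb
      else (pvLookupD A x, pvLookupD B y) :: pvMergePairs A B ka kb
  termination_by ka kb => ka.length + kb.length

def get_max_min_words_counts_alt (A : List (String × Int)) (B : List (String × Int)) : Int × Int :=
  let ka := PySem.List.sorted (A.map Prod.fst) (fun k => k) false
  let kb := PySem.List.sorted (B.map Prod.fst) (fun k => k) false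
  let pairs := pvMergePairs A B ka kb
  ((pairs.map (fun p => min p.1 p.2)).sum, (pairs.map (fun p => max p.1 p.2)).sum)

-- ===== PRECONDITION & SPEC =====
-- Pre_ excludes association lists with duplicate keys: the Python arguments are dicts, whose
-- keys are distinct by construction, so no Python input is excluded.
def Pre_get_max_min_words_counts (A : List (String × Int)) (B : List (String × Int)) : Prop :=
  (A.map Prod.fst).Nodup ∧ (B.map Prod.fst).Nodup
instance (A : List (String × Int)) (B : List (String × Int)) : Decidable (Pre_get_max_min_words_counts A B) := by unfold Pre_get_max_min_words_counts; infer_instance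
def pvWitness_get_max_min_words_counts : (List (String × Int)) × (List (String × Int)) :=
  ([("the", 2), ("cat", 1)], [("cat", 3), ("dog", 1)])

def Spec_get_max_min_words_counts (A : List (String × Int)) (B : List (String × Int)) (out : Int × Int) : Prop := out = get_max_min_words_counts_alt A B
instance (A : List (String × Int)) (B : List (String × Int)) (out : Int × Int) : Decidable (Spec_get_max_min_words_counts A B out) := by unfold Spec_get_max_min_words_counts; infer_instance

-- ===== CLAIM (what is proved, stated in full; the proofs are below) =====
def Claim_equal_get_max_min_words_counts : Prop := ∀ (A : List (String × Int)) (B : List (String × Int)), Dom_get_max_min_words_counts A B → Pre_get_max_min_words_counts A B → Spec_get_max_min_words_counts A B (get_max_min_words_counts A B)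

-- ===== LEMMAS AND PROOFS =====

-- the merged (strictly increasing) union of two strictly increasing key lists
def pvU : List String → List String → List String
  | [], kb => kb
  | x :: ka, [] => x :: ka
  | x :: ka, y :: kb =>
      if x < y then x :: pvU ka (y :: kb)
      else if y < x then y :: pvU (x :: ka) kb
      else x :: pvU ka kb
  termination_by ka kb => ka.length + kb.length

theorem mem_pvU (ka kb : List String) (k : String) : k ∈ pvU ka kb ↔ k ∈ ka ∨ k ∈ kb := by
  fun_induction pvU ka kb with
  | case1 kb => simp
  | case2 x ka => simp
  | case3 x ka y kb h ih => simp [ih]; tauto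
  | case4 x ka y kb h h' ih => simp [ih]; tauto
  | case5 x ka y kb h h' ih =>
    have hxy : x = y := le_antisymm (not_lt.mp h') (not_lt.mp h)
    simp [ih, hxy]; tauto

theorem pairwise_pvU (ka kb : List String) (ha : ka.Pairwise (· < ·)) (hb : kb.Pairwise (· < ·)) :
    (pvU ka kb).Pairwise (· < ·) := by
  fun_induction pvU ka kb with
  | case1 kb => exact hb
  | case2 x ka => exact ha
  | case3 x ka y kb h ih =>
    rw [List.pairwise_cons] at ha ⊢
    refine ⟨?_, ih ha.2 hb⟩
    intro k hk
    rcases (mem_pvU _ _ _).mp hk with hk | hk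
    · exact ha.1 k hk
    · rcases List.mem_cons.mp hk with rfl | hk
      · exact h
      · exact h.trans ((List.pairwise_cons.mp hb).1 k hk)
  | case4 x ka y kb h h' ih =>
    rw [List.pairwise_cons] at hb ⊢
    refine ⟨?_, ih ha hb.2⟩
    intro k hk
    rcases (mem_pvU _ _ _).mp hk with hk | hk
    · rcases List.mem_cons.mp hk with rfl | hk
      · exact h'
      · exact h'.trans ((List.pairwise_cons.mp ha).1 k hk)
    · exact hb.1 k hk
  | case5 x ka y kb h h' ih =>
    have hxy : x = y := le_antisymm (not_lt.mp h') (not_lt.mp h)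
    rw [List.pairwise_cons] at ha hb ⊢
    refine ⟨?_, ih ha.2 hb.2⟩
    intro k hk
    rcases (mem_pvU _ _ _).mp hk with hk | hk
    · exact ha.1 k hk
    · exact hxy ▸ hb.1 k hk

-- the merge loop produces exactly the per-union-key pair of (guarded) lookups
theorem mergePairs_eq (A B : List (String × Int)) (ka kb : List String)
    (ha : ka.Pairwise (· < ·)) (hb : kb.Pairwise (· < ·)) :
    pvMergePairs A B ka kb
      = (pvU ka kb).map (fun k =>
          ((if ka.contains k then pvLookupD A k else 0),
           (if kb.contains k then pvLookupD B k else 0))) := by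
  fun_induction pvMergePairs A B ka kb with
  | case1 kb =>
    simp only [pvU]
    refine (List.map_congr_left ?_).symm
    intro k hk
    simp [hk]
  | case2 x ka =>
    simp only [pvU]
    refine (List.map_congr_left ?_).symm
    intro k hk
    simp [hk]
  | case3 x ka y kb h ih =>
    rw [List.pairwise_cons] at ha hb
    have hxnb : x ∉ y :: kb := by
      intro hm
      rcases List.mem_cons.mp hm with rfl | hm
      · exact lt_irrefl x h
      · exact lt_irrefl x (h.trans (hb.1 x hm))
    rw [ih ha.2 (List.pairwise_cons.mpr hb)]
    simp only [pvU, if_pos h, List.map_cons]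
    congr 1
    · simp [hxnb]
    · refine List.map_congr_left ?_
      intro k hk
      have hkx : x ≠ k := by
        rintro rfl
        rcases (mem_pvU _ _ _).mp hk with hm | hm
        · exact lt_irrefl _ (ha.1 _ hm)
        · exact hxnb hm
      simp [Ne.symm hkx]
  | case4 x ka y kb h h' ih =>
    rw [List.pairwise_cons] at ha hb
    have hyna : y ∉ x :: ka := by
      intro hm
      rcases List.mem_cons.mp hm with rfl | hm
      · exact lt_irrefl y h'
      · exact lt_irrefl y (h'.trans (ha.1 y hm))
    rw [ih (List.pairwise_cons.mpr ha) hb.2]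
    simp only [pvU, if_neg h, if_pos h', List.map_cons]
    congr 1
    · simp [hyna]
    · refine List.map_congr_left ?_
      intro k hk
      have hky : y ≠ k := by
        rintro rfl
        rcases (mem_pvU _ _ _).mp hk with hm | hm
        · exact hyna hm
        · exact lt_irrefl _ (hb.1 _ hm)
      simp [Ne.symm hky]
  | case5 x ka y kb h h' ih =>
    have hxy : x = y := le_antisymm (not_lt.mp h') (not_lt.mp h)
    subst hxy
    rw [List.pairwise_cons] at ha hb
    rw [ih ha.2 hb.2]
    simp only [pvU, if_neg h', List.map_cons]
    congr 1
    · simp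
    · refine List.map_congr_left ?_
      intro k hk
      have hkx : x ≠ k := by
        rintro rfl
        rcases (mem_pvU _ _ _).mp hk with hm | hm
        · exact lt_irrefl _ (ha.1 _ hm)
        · exact lt_irrefl _ (hb.1 _ hm)
      simp [Ne.symm hkx]

theorem lookupD_not_mem (L : List (String × Int)) (k : String) (h : k ∉ L.map Prod.fst) :
    pvLookupD L k = 0 := by
  unfold pvLookupD
  have : L.find? (fun p => p.1 == k) = none := by
    rw [List.find?_eq_none]
    intro p hp hb
    exact h (List.mem_map.mpr ⟨p, hp, by simpa using hb⟩)
  simp [this]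

-- a guarded lookup is the plain lookup (the lookup is 0 off the keys anyway)
theorem guard_collapse (L : List (String × Int)) (ks : List String)
    (hm : ∀ k, k ∈ ks ↔ k ∈ L.map Prod.fst) (k : String) :
    (if ks.contains k then pvLookupD L k else 0) = pvLookupD L k := by
  split_ifs with h
  · rfl
  · refine (lookupD_not_mem L k fun m => h ?_).symm
    exact List.contains_iff_mem.mpr ((hm k).mpr m)

theorem lookup_guard (L : List (String × Int)) (w : String) :
    (if PySem.Set.contains (PySem.Set.ofList (L.map Prod.fst)) w then pvLookupD L w else 0)
      = pvLookupD L w := by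
  split_ifs with h
  · rfl
  · refine (lookupD_not_mem L w fun m => h ?_).symm
    exact (PySem.Set.contains_iff _ _).mpr ((PySem.Set.mem_ofList _ _).mpr m)

-- A's fold over the union computes a pair of sums
theorem foldl_pair_sum (l : List String) (f g : String → Int) (x y : Int) :
    l.foldl (fun (st : Int × Int) w => (st.1 + f w, st.2 + g w)) (x, y)
      = (x + (l.map f).sum, y + (l.map g).sum) := by
  induction l generalizing x y with
  | nil => simp
  | cons h t ih => simp [ih, add_assoc]

theorem sum_map_eq_of_mem_iff (l₁ l₂ : List String) (h₁ : l₁.Nodup) (h₂ : l₂.Nodup)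
    (hm : ∀ w, w ∈ l₁ ↔ w ∈ l₂) (f : String → Int) :
    (l₁.map f).sum = (l₂.map f).sum :=
  ((List.perm_ext_iff_of_nodup h₁ h₂).mpr hm).map f |>.sum_eq

theorem pairwise_lt_sorted_keys (ks : List String) (h : ks.Nodup) :
    (PySem.List.sorted ks (fun k => k) false).Pairwise (· < ·) := by
  have hle := PySem.List.sorted_pairwise ks (fun k => k)
  have hnd : (PySem.List.sorted ks (fun k => k) false).Nodup :=
    (PySem.List.sorted_perm ks (fun k => k) false).nodup_iff.mpr h
  exact (hle.and hnd).imp (fun hab => lt_of_le_of_ne hab.1 hab.2)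

-- ===== VERDICT (by name: the statement is the Claim_ definition above) =====
theorem get_max_min_words_counts_spec : Claim_equal_get_max_min_words_counts := by
  intro A B _ hpre
  obtain ⟨hA, hB⟩ := hpre
  unfold Spec_get_max_min_words_counts get_max_min_words_counts get_max_min_words_counts_alt
  simp only []
  rw [foldl_pair_sum]
  simp only [lookup_guard, zero_add]
  set ka := PySem.List.sorted (A.map Prod.fst) (fun k => k) false with hka
  set kb := PySem.List.sorted (B.map Prod.fst) (fun k => k) false with hkb
  have hmA : ∀ k, k ∈ ka ↔ k ∈ A.map Prod.fst := fun k => PySem.List.mem_sorted _ _ _ _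
  have hmB : ∀ k, k ∈ kb ↔ k ∈ B.map Prod.fst := fun k => PySem.List.mem_sorted _ _ _ _
  have hpa : ka.Pairwise (· < ·) := pairwise_lt_sorted_keys _ hA
  have hpb : kb.Pairwise (· < ·) := pairwise_lt_sorted_keys _ hB
  rw [mergePairs_eq A B ka kb hpa hpb]
  simp only [List.map_map, Function.comp_def, guard_collapse A ka hmA, guard_collapse B kb hmB]
  have hnu : (pvU ka kb).Nodup := (pairwise_pvU ka kb hpa hpb).imp ne_of_lt
  have hns : (PySem.Set.union (PySem.Set.ofList (A.map Prod.fst)) (PySem.Set.ofList (B.map Prod.fst))).Nodup :=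
    PySem.Set.nodup_union _ _ (PySem.Set.nodup_ofList _)
  have hmm : ∀ w, w ∈ (PySem.Set.union (PySem.Set.ofList (A.map Prod.fst)) (PySem.Set.ofList (B.map Prod.fst)))
      ↔ w ∈ pvU ka kb := by
    intro w
    rw [mem_pvU, hmA w, hmB w, PySem.Set.mem_union]
    simp [PySem.Set.mem_ofList]
  rw [Prod.mk.injEq]
  exact ⟨sum_map_eq_of_mem_iff _ _ hns hnu hmm _, sum_map_eq_of_mem_iff _ _ hns hnu hmm _⟩
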